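-- pv_equiv track=rewrite | github.com/ellynhan/challenge100-codingtest-study | Dongyeon/5373.py | rotate_plain
-- ===== SOURCE A (Python) =====
-- def rotate_plain(dir, state):
--         tmp_plain = [['', '', ''], ['', '', ''], ['', '', '']]
--         for i in range(3):
--                 for j in range(3):
--                         tmp_plain[i][j] = state[i][j]
--         if dir == '+':
--                 tmp_plain[0][0] = state[2][0]
--                 tmp_plain[0][1] = state[1][0]
--                 tmp_plain[0][2] = state[0][0]
--                 tmp_plain[1][0] = state[2][1]
--                 tmp_plain[1][2] = state[0][1]
--                 tmp_plain[2][0] = state[2][2]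
--                 tmp_plain[2][1] = state[1][2]
--                 tmp_plain[2][2] = state[0][2]
--
--         if dir == '-':
--                 tmp_plain[2][0] = state[0][0]
--                 tmp_plain[1][0] = state[0][1]
--                 tmp_plain[0][0] = state[0][2]
--                 tmp_plain[2][1] = state[1][0]
--                 tmp_plain[0][1] = state[1][2]
--                 tmp_plain[2][2] = state[2][0]
--                 tmp_plain[1][2] = state[2][1]
--                 tmp_plain[0][2] = state[2][2]
--
--         return tmp_plain
-- ===== SOURCE B (Python) =====
-- def rotate_plain(dir, state):
--     rows = [[row[0], row[1], row[2]] for row in (state[0], state[1], state[2])]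
--     if dir == '+':
--         return [list(col) for col in zip(*rows[::-1])]
--     if dir == '-':
--         return [list(col) for col in zip(*rows)][::-1]
--     return rows
-- ===== Notes on version B (the rewrite author's own statement) =====
-- stated objective: alternative
-- what changed: B expresses the rotation as whole-matrix operations -- fetch the 3x3 face, then clockwise = reverse the row order and transpose (zip(*rows[::-1])), counterclockwise = transpose then reverse -- instead of copying the face and overwriting eight cells by an explicit per-cell index mapping.
import Mathlib
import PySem

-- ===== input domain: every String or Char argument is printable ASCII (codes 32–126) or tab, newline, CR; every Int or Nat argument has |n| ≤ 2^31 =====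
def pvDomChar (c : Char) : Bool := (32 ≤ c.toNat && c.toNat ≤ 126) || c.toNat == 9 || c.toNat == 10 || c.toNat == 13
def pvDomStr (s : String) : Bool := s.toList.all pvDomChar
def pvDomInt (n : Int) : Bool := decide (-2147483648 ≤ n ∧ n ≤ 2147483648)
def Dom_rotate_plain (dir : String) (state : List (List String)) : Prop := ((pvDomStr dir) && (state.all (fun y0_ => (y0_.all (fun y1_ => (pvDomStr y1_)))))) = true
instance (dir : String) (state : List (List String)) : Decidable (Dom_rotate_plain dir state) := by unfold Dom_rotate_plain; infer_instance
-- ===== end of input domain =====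

-- B: fetch the 3x3 face, then clockwise = reverse rows + transpose, counterclockwise = transpose + reverse rows (no per-cell index mapping).

-- ===== PORT A =====
-- tmp_plain[i][j] = v  (in-range on Pre_, so getD/set defaults are never hit there)
def setCell (m : List (List String)) (i j : Nat) (v : String) : List (List String) :=
  m.set i ((m.getD i []).set j v)

-- state[i][j] with nonnegative literal indices (in-range on Pre_)
def cellA (state : List (List String)) (i j : Nat) : String := (state.getD i []).getD j ""

def rotate_plain (dir : String) (state : List (List String)) : List (List String) :=
  let t0 : List (List String) := [["", "", ""], ["", "", ""], ["", "", ""]]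
  -- for i in range(3): for j in range(3): tmp_plain[i][j] = state[i][j]
  let t1 := (PySem.List.pyRange 0 3 1).foldl (fun t i =>
      (PySem.List.pyRange 0 3 1).foldl (fun t j =>
        setCell t i.toNat j.toNat (cellA state i.toNat j.toNat)) t) t0
  let t2 := if dir = "+" then
      setCell (setCell (setCell (setCell (setCell (setCell (setCell (setCell t1
        0 0 (cellA state 2 0)) 0 1 (cellA state 1 0)) 0 2 (cellA state 0 0))
        1 0 (cellA state 2 1)) 1 2 (cellA state 0 1)) 2 0 (cellA state 2 2))
        2 1 (cellA state 1 2)) 2 2 (cellA state 0 2)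
    else t1
  if dir = "-" then
      setCell (setCell (setCell (setCell (setCell (setCell (setCell (setCell t2
        2 0 (cellA state 0 0)) 1 0 (cellA state 0 1)) 0 0 (cellA state 0 2))
        2 1 (cellA state 1 0)) 0 1 (cellA state 1 2)) 2 2 (cellA state 2 0))
        1 2 (cellA state 2 1)) 0 2 (cellA state 2 2)
  else t2

-- ===== PORT B =====
-- zipStar m = Python's zip(*m): columns of m, truncated to the shortest row (exact)
def zipStar (m : List (List String)) : List (List String) :=
  match m with
  | [] => []
  | [r] => r.map (fun x => [x])
  | r :: rest => List.zipWith (fun x c => x :: c) r (zipStar rest)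

def rotate_plain_alt (dir : String) (state : List (List String)) : List (List String) :=
  -- rows = the 3x3 face fetched by index (raises where A does; in-range on Pre_, so getD defaults are never hit there)
  let rows := [[cellA state 0 0, cellA state 0 1, cellA state 0 2],
               [cellA state 1 0, cellA state 1 1, cellA state 1 2],
               [cellA state 2 0, cellA state 2 1, cellA state 2 2]]
  if dir = "+" then zipStar rows.reverse
  else if dir = "-" then (zipStar rows).reverse
  else rows

-- ===== PRECONDITION & SPEC =====
-- Pre_ excludes exactly the inputs where A raises IndexError: fewer than 3 rows, or one of the first 3 rows shorter than 3.
def Pre_rotate_plain (dir : String) (state : List (List String)) : Prop :=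
  3 ≤ state.length ∧ ∀ r ∈ state.take 3, 3 ≤ r.length
instance (dir : String) (state : List (List String)) : Decidable (Pre_rotate_plain dir state) := by
  unfold Pre_rotate_plain; infer_instance

def pvWitness_rotate_plain : String × List (List String) :=
  ("+", [["a", "b", "c"], ["d", "e", "f"], ["g", "h", "i"]])

def Spec_rotate_plain (dir : String) (state : List (List String)) (out : List (List String)) : Prop := out = rotate_plain_alt dir state
instance (dir : String) (state : List (List String)) (out : List (List String)) : Decidable (Spec_rotate_plain dir state out) := by unfold Spec_rotate_plain; infer_instance

-- ===== CLAIM (what is proved, stated in full; the proofs are below) =====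
def Claim_equal_rotate_plain : Prop := ∀ (dir : String) (state : List (List String)), Dom_rotate_plain dir state → Pre_rotate_plain dir state → Spec_rotate_plain dir state (rotate_plain dir state)

-- ===== LEMMAS AND PROOFS =====

lemma pyRange03 : PySem.List.pyRange 0 3 1 = [0, 1, 2] := by decide

-- ===== VERDICT (by name: the statement is the Claim_ definition above) =====
theorem rotate_plain_spec : Claim_equal_rotate_plain := by
  intro dir state _ hpre
  obtain ⟨hlen, hrows⟩ := hpre
  unfold Spec_rotate_plain
  obtain ⟨r0, state, rfl, hlen⟩ : ∃ r s, state = r :: s ∧ 3 ≤ s.length + 1 := by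
    cases state with
    | nil => simp at hlen
    | cons r s => exact ⟨r, s, rfl, by simpa using hlen⟩
  obtain ⟨r1, state, rfl, hlen⟩ : ∃ r s, state = r :: s ∧ 3 ≤ s.length + 2 := by
    cases state with
    | nil => simp at hlen
    | cons r s => exact ⟨r, s, rfl, by simpa using hlen⟩
  obtain ⟨r2, state, rfl⟩ : ∃ r s, state = r :: s := by
    cases state with
    | nil => simp at hlen
    | cons r s => exact ⟨r, s, rfl⟩
  have h0 : 3 ≤ r0.length := hrows r0 (by simp)
  have h1 : 3 ≤ r1.length := hrows r1 (by simp)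
  have h2 : 3 ≤ r2.length := hrows r2 (by simp)
  obtain ⟨a0, a1, a2, ar, rfl⟩ : ∃ a0 a1 a2 ar, r0 = a0 :: a1 :: a2 :: ar := by
    match r0, h0 with
    | a0 :: a1 :: a2 :: ar, _ => exact ⟨a0, a1, a2, ar, rfl⟩
  obtain ⟨b0, b1, b2, br, rfl⟩ : ∃ b0 b1 b2 br, r1 = b0 :: b1 :: b2 :: br := by
    match r1, h1 with
    | b0 :: b1 :: b2 :: br, _ => exact ⟨b0, b1, b2, br, rfl⟩
  obtain ⟨c0, c1, c2, cr, rfl⟩ : ∃ c0 c1 c2 cr, r2 = c0 :: c1 :: c2 :: cr := by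
    match r2, h2 with
    | c0 :: c1 :: c2 :: cr, _ => exact ⟨c0, c1, c2, cr, rfl⟩
  by_cases hp : dir = "+" <;> by_cases hm : dir = "-" <;>
    simp [rotate_plain, rotate_plain_alt, setCell, cellA, pyRange03,
      zipStar, hp, hm]
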